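-- pv_equiv track=rewrite | github.com/ukiyun/UNI_2021-22 | FP/RE/RE05/4.py | stats_by_team
-- ===== SOURCE A (Python) =====
-- def stats_by_team(top_scorers, team_name):
--     max_goals = 0
--     players = ((),)
--     for pair in top_scorers:
--         if (team_name == pair[1]):
--             max_goals += pair[3]
--             players = players + ((pair[0], pair[3]),)
--     return ((team_name, max_goals),) + players[1:]
-- ===== SOURCE B (Python) =====
-- def stats_by_team(top_scorers, team_name):
--     # divide and conquer: split the index range in half, solve each half
--     # recursively, combine by adding totals and concatenating player tuples
--     def go(lo, hi):
--         if lo == hi: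
--             return 0, ()
--         if hi - lo == 1:
--             row = top_scorers[lo]
--             if row[1] == team_name:
--                 return row[3], ((row[0], row[3]),)
--             return 0, ()
--         mid = (lo + hi) // 2
--         t1, p1 = go(lo, mid)
--         t2, p2 = go(mid, hi)
--         return t1 + t2, p1 + p2
--     total, players = go(0, len(top_scorers))
--     return ((team_name, total),) + players
-- ===== Notes on version B (the rewrite author's own statement) =====
-- stated objective: alternative
-- what changed: Replaces A's single fused left-to-right loop (sentinel ((),) tuple, repeated tuple concatenation, players[1:] trim) with a divide-and-conquer recursion: split the list in half, recursively compute (total, players) for each half, combine by adding totals and concatenating the halves; correct because filtering, summing and the output order all distribute over list concatenation.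
import Mathlib
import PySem

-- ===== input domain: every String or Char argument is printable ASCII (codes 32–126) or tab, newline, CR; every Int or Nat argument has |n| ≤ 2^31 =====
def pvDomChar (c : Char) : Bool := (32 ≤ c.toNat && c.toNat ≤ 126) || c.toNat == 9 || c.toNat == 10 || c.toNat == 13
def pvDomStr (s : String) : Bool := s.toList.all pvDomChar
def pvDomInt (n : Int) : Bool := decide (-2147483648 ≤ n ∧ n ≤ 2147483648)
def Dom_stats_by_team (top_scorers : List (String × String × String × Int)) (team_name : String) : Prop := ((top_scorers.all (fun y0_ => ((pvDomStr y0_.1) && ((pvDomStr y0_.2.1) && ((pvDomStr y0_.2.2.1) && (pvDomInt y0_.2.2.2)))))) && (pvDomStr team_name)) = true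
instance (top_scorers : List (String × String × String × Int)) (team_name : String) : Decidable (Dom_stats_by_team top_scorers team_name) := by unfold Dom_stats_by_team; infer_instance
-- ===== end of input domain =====

-- ===== PORT A =====
-- B replaces A's fused single loop with a divide-and-conquer recursion over the list (split at the midpoint, combine halves); objective: alternative.
def stats_by_team (top_scorers : List (String × String × String × Int)) (team_name : String) : List (String × Int) :=
  let st := top_scorers.foldl
    (fun (acc : Int × List (String × Int)) pair =>
      if team_name == pair.2.1 then
        (acc.1 + pair.2.2.2, acc.2 ++ [(pair.1, pair.2.2.2)])
      else acc)
    (0, [])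
  (team_name, st.1) :: st.2

-- ===== PORT B =====
-- Source B's divide-and-conquer go(lo,hi), ported over the sublist l = top_scorers[lo:hi]
-- (the index pair is represented by the sublist itself; the split at mid=(lo+hi)//2
--  becomes take/drop at length/2, the same midpoint)
def stats_dc (team_name : String) (l : List (String × String × String × Int)) :
    Int × List (String × Int) :=
  match l with
  | [] => (0, [])
  | [row] =>
    if row.2.1 == team_name then (row.2.2.2, [(row.1, row.2.2.2)]) else (0, [])
  | a :: b :: rest =>
    let l' := a :: b :: rest
    let mid := l'.length / 2
    let left := stats_dc team_name (l'.take mid)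
    let right := stats_dc team_name (l'.drop mid)
    (left.1 + right.1, left.2 ++ right.2)
termination_by l.length
decreasing_by
  · simp [List.length_take]; omega
  · simp; omega

def stats_by_team_alt (top_scorers : List (String × String × String × Int)) (team_name : String) : List (String × Int) :=
  let tp := stats_dc team_name top_scorers
  (team_name, tp.1) :: tp.2

-- ===== PRECONDITION & SPEC =====
def Spec_stats_by_team (top_scorers : List (String × String × String × Int)) (team_name : String) (out : List (String × Int)) : Prop := out = stats_by_team_alt top_scorers team_name
instance (top_scorers : List (String × String × String × Int)) (team_name : String) (out : List (String × Int)) : Decidable (Spec_stats_by_team top_scorers team_name out) := by unfold Spec_stats_by_team; infer_instance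

-- ===== CLAIM (what is proved, stated in full; the proofs are below) =====
def Claim_equal_stats_by_team : Prop := ∀ (top_scorers : List (String × String × String × Int)) (team_name : String), Dom_stats_by_team top_scorers team_name → Spec_stats_by_team top_scorers team_name (stats_by_team top_scorers team_name)

-- ===== LEMMAS AND PROOFS =====
-- the common specification: matching players of l, and their goal total
def pvMatches (team_name : String) (l : List (String × String × String × Int)) : List (String × Int) :=
  (l.filter (fun pair => pair.2.1 == team_name)).map (fun pair => (pair.1, pair.2.2.2))

theorem stats_dc_eq (team_name : String) (l : List (String × String × String × Int)) :
    stats_dc team_name l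
      = (((pvMatches team_name l).map Prod.snd).sum, pvMatches team_name l) := by
  induction l using stats_dc.induct team_name with
  | case1 => simp [stats_dc, pvMatches]
  | case2 row hc =>
    unfold stats_dc pvMatches
    simp [List.filter, hc]
  | case3 row hc =>
    unfold stats_dc pvMatches
    simp [List.filter, hc]
  | case4 a b rest lp mid ih1 ih2 =>
    unfold stats_dc
    simp only [mid, lp, List.length_cons] at ih1 ih2
    simp only [List.length_cons]
    rw [ih1, ih2]
    have hsplit := List.take_append_drop ((rest.length + 1 + 1) / 2) (a :: b :: rest)
    have hm : pvMatches team_name (a :: b :: rest)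
        = pvMatches team_name ((a :: b :: rest).take ((rest.length + 1 + 1) / 2))
          ++ pvMatches team_name ((a :: b :: rest).drop ((rest.length + 1 + 1) / 2)) := by
      conv_lhs => rw [← hsplit]
      simp only [pvMatches, List.filter_append, List.map_append]
    rw [hm]
    simp only [List.map_append, List.sum_append]

theorem stats_by_team_fold (team_name : String)
    (ts : List (String × String × String × Int)) (g : Int) (ps : List (String × Int)) :
    ts.foldl
      (fun (acc : Int × List (String × Int)) pair =>
        if team_name == pair.2.1 then
          (acc.1 + pair.2.2.2, acc.2 ++ [(pair.1, pair.2.2.2)])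
        else acc)
      (g, ps)
    = (g + ((pvMatches team_name ts).map Prod.snd).sum, ps ++ pvMatches team_name ts) := by
  induction ts generalizing g ps with
  | nil => simp [pvMatches]
  | cons h t ih =>
    simp only [List.foldl_cons]
    have hsym : (team_name == h.2.1) = (h.2.1 == team_name) := by
      simp [eq_comm]
    rw [hsym]
    cases hc : (h.2.1 == team_name) with
    | true =>
      simp only [ih]
      simp [pvMatches, List.filter, hc, add_assoc]
    | false =>
      simp only [Bool.false_eq_true, if_false, ih]
      simp [pvMatches, List.filter, hc]

-- ===== VERDICT (by name: the statement is the Claim_ definition above) =====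
theorem stats_by_team_spec : Claim_equal_stats_by_team := by
  intro ts tn _
  unfold Spec_stats_by_team stats_by_team stats_by_team_alt
  rw [stats_dc_eq, stats_by_team_fold]
  simp
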